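-- pv_equiv track=rewrite | github.com/Josverl/micropython | scratch/add_missing_descriptions.py | choose_best_description
-- ===== SOURCE A (Python) =====
-- def choose_best_description(defs_for_name):
--     ai = [d for d in defs_for_name if d.get('description_ai')]
--     if ai:
--         ai.sort(key=lambda d: len(d['description_ai']), reverse=True)
--         return ai[0]['description_ai']
--     descr = [d for d in defs_for_name if d.get('description')]
--     if descr:
--         descr.sort(key=lambda d: len(d['description']), reverse=True)
--         return descr[0]['description']
--     comment_candidates = [d for d in defs_for_name if d.get('comment')]
--     if comment_candidates:
--         comment_candidates.sort(key=lambda d: len(d['comment']), reverse=True)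
--         return comment_candidates[0]['comment']
--     value_candidates = [d for d in defs_for_name if d.get('value')]
--     if value_candidates:
--         value_candidates.sort(key=lambda d: len(d['value']), reverse=True)
--         return value_candidates[0]['value']
--     return ''
-- ===== SOURCE B (Python) =====
-- _PRIORITY = ('description_ai', 'description', 'comment', 'value')
--
-- def choose_best_description(defs_for_name):
--     for key in _PRIORITY:
--         best = None
--         for d in defs_for_name:
--             v = d.get(key)
--             if v and (best is None or len(v) > len(best)):
--                 best = v
--         if best is not None:
--             return best
--     return ''
-- ===== Notes on version B (the rewrite author's own statement) =====
-- stated objective: simpler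
-- what changed: Replaces the four unrolled filter+stable-sort+[0] blocks with one loop over a priority key tuple that keeps the first longest truthy value in a single pass per key (no sort).
import Mathlib
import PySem

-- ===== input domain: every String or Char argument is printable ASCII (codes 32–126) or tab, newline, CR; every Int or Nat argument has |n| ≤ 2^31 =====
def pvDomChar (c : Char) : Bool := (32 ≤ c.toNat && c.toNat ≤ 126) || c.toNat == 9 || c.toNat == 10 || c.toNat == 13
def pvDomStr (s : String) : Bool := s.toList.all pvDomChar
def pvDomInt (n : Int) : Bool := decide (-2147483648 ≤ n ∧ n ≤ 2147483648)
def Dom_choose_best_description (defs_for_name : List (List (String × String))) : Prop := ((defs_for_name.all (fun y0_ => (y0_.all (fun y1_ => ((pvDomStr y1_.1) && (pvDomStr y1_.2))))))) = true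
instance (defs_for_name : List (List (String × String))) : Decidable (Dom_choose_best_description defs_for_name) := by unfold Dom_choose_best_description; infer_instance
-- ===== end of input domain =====

-- B collapses A's four unrolled filter+sort+[0] blocks into one data-driven pass per priority key
-- that keeps the first longest candidate (objective: simpler; no speed claim).

-- d.get(key): first-match association-list lookup; missing key and empty value are both falsy,
-- so we collapse None to "" (A only ever reads the value after a truthiness check).
def pvGet (d : List (String × String)) (k : String) : String :=
  ((PySem.Dict.mk d).get? k).getD ""

-- ===== PORT A =====
def choose_best_description (defs_for_name : List (List (String × String))) : String :=
  let ai := defs_for_name.filter (fun d => pvGet d "description_ai" != "")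
  if !ai.isEmpty then
    pvGet (PySem.List.sorted ai (fun d => PySem.Str.len (pvGet d "description_ai")) true).headI "description_ai"
  else
    let descr := defs_for_name.filter (fun d => pvGet d "description" != "")
    if !descr.isEmpty then
      pvGet (PySem.List.sorted descr (fun d => PySem.Str.len (pvGet d "description")) true).headI "description"
    else
      let comment_candidates := defs_for_name.filter (fun d => pvGet d "comment" != "")
      if !comment_candidates.isEmpty then
        pvGet (PySem.List.sorted comment_candidates (fun d => PySem.Str.len (pvGet d "comment")) true).headI "comment"
      else
        let value_candidates := defs_for_name.filter (fun d => pvGet d "value" != "")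
        if !value_candidates.isEmpty then
          pvGet (PySem.List.sorted value_candidates (fun d => PySem.Str.len (pvGet d "value")) true).headI "value"
        else
          ""

-- ===== PORT B =====
-- inner loop of Source B: first longest truthy value of `key` among the dicts, else none
def pvBestFor (defs_for_name : List (List (String × String))) (key : String) : Option String :=
  defs_for_name.foldl
    (fun best d =>
      let v := pvGet d key
      if v != "" && (best.isNone || PySem.Str.len v > PySem.Str.len (best.getD "")) then some v
      else best)
    none

-- outer loop of Source B over the priority tuple
def pvFirstKey (keys : List String) (defs_for_name : List (List (String × String))) : String :=
  match keys with
  | [] => ""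
  | k :: rest =>
    match pvBestFor defs_for_name k with
    | some b => b
    | none => pvFirstKey rest defs_for_name

def choose_best_description_alt (defs_for_name : List (List (String × String))) : String :=
  pvFirstKey ["description_ai", "description", "comment", "value"] defs_for_name

-- ===== PRECONDITION & SPEC =====
def Spec_choose_best_description (defs_for_name : List (List (String × String))) (out : String) : Prop := out = choose_best_description_alt defs_for_name
instance (defs_for_name : List (List (String × String))) (out : String) : Decidable (Spec_choose_best_description defs_for_name out) := by unfold Spec_choose_best_description; infer_instance

-- ===== CLAIM (what is proved, stated in full; the proofs are below) =====
def Claim_equal_choose_best_description : Prop := ∀ (defs_for_name : List (List (String × String))), Dom_choose_best_description defs_for_name → Spec_choose_best_description defs_for_name (choose_best_description defs_for_name)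

-- ===== LEMMAS AND PROOFS =====

-- proof-side names for B's fold step, A's insertion-sort step, and the head/best relation
def pvStep (k : String) (best : Option String) (d : List (String × String)) : Option String :=
  let v := pvGet d k
  if v != "" && (best.isNone || PySem.Str.len v > PySem.Str.len (best.getD "")) then some v
  else best

def pvIns (k : String) (acc : List (List (String × String))) (d : List (String × String)) :
    List (List (String × String)) :=
  PySem.List.insertBy (fun a b => decide (PySem.Str.len (pvGet b k) < PySem.Str.len (pvGet a k))) d acc

def pvRel (k : String) (acc : List (List (String × String))) (best : Option String) : Prop :=
  match acc with
  | [] => best = none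
  | m :: _ => best = some (pvGet m k)

lemma pvBestFor_eq (defs_for_name : List (List (String × String))) (k : String) :
    pvBestFor defs_for_name k = defs_for_name.foldl (pvStep k) none := rfl

lemma sorted_eq_foldl_pvIns (k : String) (l : List (List (String × String))) :
    PySem.List.sorted l (fun d => PySem.Str.len (pvGet d k)) true = l.foldl (pvIns k) [] :=
  PySem.List.sorted_rev_eq_foldl_insertBy l _

-- B's fold step skips entries with a falsy value, so folding over all dicts equals
-- folding over A's filtered candidate list.
lemma foldl_pvStep_filter (k : String) (l : List (List (String × String))) :
    ∀ best : Option String,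
      l.foldl (pvStep k) best = (l.filter (fun d => pvGet d k != "")).foldl (pvStep k) best := by
  induction l with
  | nil => intro best; rfl
  | cons d t ih =>
    intro best
    simp only [List.foldl_cons, List.filter_cons]
    by_cases h : (pvGet d k != "") = true
    · rw [if_pos h, List.foldl_cons]
      exact ih _
    · rw [if_neg h]
      have h' : pvGet d k = "" := by simpa using h
      have hstep : pvStep k best d = best := by simp [pvStep, h']
      rw [hstep]
      exact ih _

-- one insertion step preserves the head/best relation
lemma pv_step_insert (k : String) (d : List (String × String)) (hd : pvGet d k ≠ "")
    (acc : List (List (String × String))) (best : Option String)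
    (h : pvRel k acc best) : pvRel k (pvIns k acc d) (pvStep k best d) := by
  cases acc with
  | nil =>
    simp only [pvRel] at h
    subst h
    simp [pvIns, PySem.List.insertBy, pvRel, pvStep, hd]
  | cons m t =>
    simp only [pvRel] at h
    subst h
    simp only [pvIns, PySem.List.insertBy]
    by_cases hc : PySem.Str.len (pvGet m k) < PySem.Str.len (pvGet d k)
    · rw [if_pos (by simpa using hc)]
      have hc' : (pvGet m k).length < (pvGet d k).length := by
        simpa [PySem.Str.len_eq] using hc
      simp only [pvRel, pvStep]
      simp [hd]
      intro hle
      exact absurd hle (by omega)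
    · rw [if_neg (by simpa using hc)]
      have hc' : ¬ (pvGet m k).length < (pvGet d k).length := by
        simpa [PySem.Str.len_eq] using hc
      simp only [pvRel, pvStep]
      simp [hd]
      intro hlt
      exact absurd hlt hc' 

-- folding the whole candidate list preserves the relation
lemma pv_fold_rel (k : String) (l : List (List (String × String)))
    (hl : ∀ d ∈ l, pvGet d k ≠ "") :
    ∀ (acc : List (List (String × String))) (best : Option String),
      pvRel k acc best → pvRel k (l.foldl (pvIns k) acc) (l.foldl (pvStep k) best) := by
  induction l with
  | nil => intro acc best h; simpa using h
  | cons d t ih =>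
    intro acc best h
    have hd : pvGet d k ≠ "" := hl d (by simp)
    have ht : ∀ x ∈ t, pvGet x k ≠ "" := fun x hx => hl x (by simp [hx])
    exact ih ht _ _ (pv_step_insert k d hd acc best h)

-- per-key characterisation: B's inner loop returns the value of the head of A's
-- reverse-sorted candidate list (none exactly when there is no candidate)
lemma pvBestFor_char (k : String) (defs_for_name : List (List (String × String))) :
    pvRel k (PySem.List.sorted (defs_for_name.filter (fun d => pvGet d k != ""))
        (fun d => PySem.Str.len (pvGet d k)) true) (pvBestFor defs_for_name k) := by
  rw [sorted_eq_foldl_pvIns, pvBestFor_eq, foldl_pvStep_filter]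
  exact pv_fold_rel k _ (by intro d hd; simpa using (List.of_mem_filter hd)) [] none rfl

-- one branch of the final case analysis
lemma pv_branch (k : String) (defs_for_name : List (List (String × String))) (rest : List String) :
    (let cands := defs_for_name.filter (fun d => pvGet d k != "")
     if !cands.isEmpty then
       pvGet (PySem.List.sorted cands (fun d => PySem.Str.len (pvGet d k)) true).headI k
     else pvFirstKey rest defs_for_name)
    = pvFirstKey (k :: rest) defs_for_name := by
  have h := pvBestFor_char k defs_for_name
  simp only [pvFirstKey]
  cases hs : PySem.List.sorted (defs_for_name.filter (fun d => pvGet d k != ""))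
      (fun d => PySem.Str.len (pvGet d k)) true with
  | nil =>
    rw [hs] at h
    simp only [pvRel] at h
    have hcands : defs_for_name.filter (fun d => pvGet d k != "") = [] := by
      have := PySem.List.sorted_eq_nil_iff (defs_for_name.filter (fun d => pvGet d k != ""))
        (fun d => PySem.Str.len (pvGet d k)) true
      exact this.mp hs
    simp [hcands, h]
  | cons m t =>
    rw [hs] at h
    simp only [pvRel] at h
    have hne : defs_for_name.filter (fun d => pvGet d k != "") ≠ [] := by
      intro hc
      rw [(PySem.List.sorted_eq_nil_iff _ _ _).mpr hc] at hs
      exact (List.cons_ne_nil m t) hs.symm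
    have hie : (defs_for_name.filter (fun d => pvGet d k != "")).isEmpty = false := by
      simpa [List.isEmpty_iff] using hne
    simp [hie, h]

-- ===== VERDICT (by name: the statement is the Claim_ definition above) =====
theorem choose_best_description_spec : Claim_equal_choose_best_description := by
  intro defs_for_name _
  unfold Spec_choose_best_description choose_best_description choose_best_description_alt
  rw [← pv_branch "description_ai" defs_for_name ["description", "comment", "value"]]
  rw [← pv_branch "description" defs_for_name ["comment", "value"]]
  rw [← pv_branch "comment" defs_for_name ["value"]]
  rw [← pv_branch "value" defs_for_name []]
  simp [pvFirstKey]
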